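-- pv_equiv track=rewrite | github.com/Lukgamer06/mc-Lucas-Ardila-2025 | Taller 8.py | base8
-- ===== SOURCE A (Python) =====
-- def base8(num, valido):
--     num = int(num)
--     if valido:
--         if num == 0:
--             return "0"
--         a=list()
--         while num:
--             a.append(int(num % 8))
--             num //= 8
--         a.reverse()
--         return ''.join(map(str, a))
--     else:
--         return "Numero invalido"
-- ===== SOURCE B (Python) =====
-- def base8(num, valido):
--     num = int(num)
--     if valido:
--         return oct(num)[2:]
--     else:
--         return "Numero invalido"
-- ===== Notes on version B (the rewrite author's own statement) =====
-- stated objective: idiomatic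
-- what changed: Replaces the hand-written divide-by-8 loop with list append/reverse/join by the builtin octal formatter oct(num)[2:], which also subsumes the num == 0 special case.
-- outside the precondition, e.g. on base8(-1, True): A does not finish within the time limit, B returns 'o1'
import Mathlib
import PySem

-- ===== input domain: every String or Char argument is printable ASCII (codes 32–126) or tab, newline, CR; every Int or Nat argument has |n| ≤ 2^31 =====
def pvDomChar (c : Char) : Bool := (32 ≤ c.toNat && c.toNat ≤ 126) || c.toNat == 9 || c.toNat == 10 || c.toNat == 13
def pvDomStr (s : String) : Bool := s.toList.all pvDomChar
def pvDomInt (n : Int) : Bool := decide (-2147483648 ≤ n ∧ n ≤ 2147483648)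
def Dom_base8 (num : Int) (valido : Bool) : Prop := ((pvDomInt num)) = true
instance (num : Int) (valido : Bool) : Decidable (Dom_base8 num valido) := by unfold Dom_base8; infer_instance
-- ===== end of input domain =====

-- B replaces A's hand-written divide-by-8 loop (list append / reverse / join) by Python's
-- builtin octal formatter oct(num)[2:], which also subsumes the num == 0 case (objective: idiomatic).

-- ===== PORT A =====
-- the 'while num:' loop as fuel recursion; fuel = num.toNat is enough since the loop value
-- strictly decreases on 0 < num, and fuel is a pure totality guard: it never runs out on
-- inputs admitted by Pre_base8 (num < 0 diverges in Python and is excluded there)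
def base8_loop (fuel : Nat) (num : Int) (a : List Int) : List Int :=
  match fuel with
  | 0 => a
  | fuel + 1 =>
    if 0 < num then
      base8_loop fuel (PySem.Int.floordiv num 8) (a ++ [PySem.Int.mod num 8])
    else a

def base8 (num : Int) (valido : Bool) : String :=
  if valido then
    if num = 0 then "0"
    else String.join (((base8_loop num.toNat num []).reverse).map PySem.Int.toStr)
  else "Numero invalido"

-- ===== PORT B =====
-- Python's builtin oct ported exactly: sign, then the '0o' prefix, then the octal digits of
-- |n| rendered by the library (Nat.toDigits 8: '0' for 0, most significant digit first)
def pyOct (n : Int) : String :=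
  if n < 0 then "-0o" ++ String.ofList (Nat.toDigits 8 (-n).toNat)
  else "0o" ++ String.ofList (Nat.toDigits 8 n.toNat)

def base8_alt (num : Int) (valido : Bool) : String :=
  if valido then PySem.Str.slice (pyOct num) (some 2) none
  else "Numero invalido"

-- ===== PRECONDITION & SPEC =====
-- Pre_ excludes valido = true with num < 0: there A's while-loop never terminates
-- (num //= 8 stays negative), so A returns on no such input.
def Pre_base8 (num : Int) (valido : Bool) : Prop := valido = true → 0 ≤ num
instance (num : Int) (valido : Bool) : Decidable (Pre_base8 num valido) := by
  unfold Pre_base8; infer_instance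
def pvWitness_base8 : Int × Bool := (123, true)
def Spec_base8 (num : Int) (valido : Bool) (out : String) : Prop := out = base8_alt num valido
instance (num : Int) (valido : Bool) (out : String) : Decidable (Spec_base8 num valido out) := by unfold Spec_base8; infer_instance

-- ===== CLAIM (what is proved, stated in full; the proofs are below) =====
def Claim_equal_base8 : Prop := ∀ (num : Int) (valido : Bool), Dom_base8 num valido → Pre_base8 num valido → Spec_base8 num valido (base8 num valido)

-- ===== LEMMAS AND PROOFS =====

-- reference rendering of the octal digits of a Nat ("" for 0), most significant first
def octStr (n : Nat) : String :=
  if n = 0 then "" else octStr (n / 8) ++ String.singleton (Nat.digitChar (n % 8))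
decreasing_by exact Nat.div_lt_self (Nat.pos_of_ne_zero (by assumption)) (by norm_num)

theorem pv_floordiv_toNat (num : Int) (h : 0 ≤ num) :
    (PySem.Int.floordiv num 8).toNat = num.toNat / 8 := by
  simp [PySem.Int.floordiv, Int.fdiv_eq_ediv]
  omega

theorem pv_floordiv_nonneg (num : Int) (h : 0 ≤ num) : 0 ≤ PySem.Int.floordiv num 8 := by
  simp [PySem.Int.floordiv, Int.fdiv_eq_ediv]
  omega

theorem pv_mod_eq (num : Int) (h : 0 ≤ num) :
    PySem.Int.mod num 8 = ((num.toNat % 8 : Nat) : Int) := by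
  simp [PySem.Int.mod, Int.fmod_eq_emod]
  omega

theorem pv_toStr_digit (d : Nat) (hd : d < 8) :
    PySem.Int.toStr (d : Int) = String.singleton (Nat.digitChar d) := by
  interval_cases d <;> decide

theorem pv_foldl_append (l : List String) :
    ∀ s : String, l.foldl (fun r t => r ++ t) s = s ++ l.foldl (fun r t => r ++ t) "" := by
  induction l with
  | nil => intro s; simp [List.foldl]
  | cons x xs ih =>
    intro s
    simp only [List.foldl]
    rw [ih (s ++ x), ih ("" ++ x), String.append_assoc]
    simp

theorem pv_join_cons (s : String) (l : List String) :
    String.join (s :: l) = s ++ String.join l := by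
  simp only [String.join, List.foldl]
  rw [pv_foldl_append l ("" ++ s)]
  simp

-- A's loop, reversed and joined, renders octStr in front of the accumulator's rendering
theorem join_loop_eq_octStr (fuel : Nat) :
    ∀ (num : Int) (a : List Int), 0 ≤ num → num.toNat ≤ fuel →
      String.join (((base8_loop fuel num a).reverse).map PySem.Int.toStr)
        = octStr num.toNat ++ String.join ((a.reverse).map PySem.Int.toStr) := by
  induction fuel with
  | zero =>
    intro num a h hf
    have : num.toNat = 0 := by omega
    rw [base8_loop, octStr, if_pos this]
    simp
  | succ k ih =>
    intro num a h hf
    by_cases hp : 0 < num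
    · rw [base8_loop]
      simp only [hp, if_true]
      have h8 : num.toNat / 8 < num.toNat := Nat.div_lt_self (by omega) (by norm_num)
      rw [ih _ _ (pv_floordiv_nonneg num h) (by rw [pv_floordiv_toNat num h]; omega)]
      rw [pv_floordiv_toNat num h, pv_mod_eq num h]
      conv_rhs => rw [octStr, if_neg (by omega : ¬ num.toNat = 0)]
      simp only [List.reverse_append, List.reverse_cons, List.reverse_nil, List.nil_append,
        List.map_cons, List.singleton_append, pv_join_cons]
      rw [pv_toStr_digit _ (Nat.mod_lt _ (by norm_num)), String.append_assoc]
    · rw [base8_loop]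
      have : num.toNat = 0 := by omega
      simp [hp, octStr, this]

-- Nat.toDigitsCore renders octStr in front of the accumulator (for 0 < n, enough fuel)
theorem toDigitsCore_eq_octStr (fuel : Nat) :
    ∀ (n : Nat) (acc : List Char), 0 < n → n < fuel →
      String.ofList (Nat.toDigitsCore 8 fuel n acc) = octStr n ++ String.ofList acc := by
  induction fuel with
  | zero => intro n acc h hf; omega
  | succ k ih =>
    intro n acc h hf
    rw [Nat.toDigitsCore]
    by_cases h0 : n / 8 = 0
    · simp only [h0, if_true]
      conv_rhs => rw [octStr, if_neg (by omega : ¬ n = 0), h0, octStr]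
      simp [String.singleton_eq_ofList, ← String.ofList_append]
    · have hlt : n / 8 < n := Nat.div_lt_self h (by norm_num)
      simp only [if_neg h0]
      rw [ih _ _ (by omega) (by omega)]
      conv_rhs => rw [octStr, if_neg (by omega : ¬ n = 0)]
      rw [String.append_assoc]
      simp [String.singleton_eq_ofList, ← String.ofList_append]

theorem toDigits_eq_octStr (n : Nat) (h : 0 < n) :
    String.ofList (Nat.toDigits 8 n) = octStr n := by
  rw [Nat.toDigits, toDigitsCore_eq_octStr (n + 1) n [] h (by omega)]
  simp

theorem slice_two_cons (c₁ c₂ : Char) (l : List Char) :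
    PySem.Str.slice (String.ofList (c₁ :: c₂ :: l)) (some 2) none = String.ofList l := by
  simp [PySem.Str.slice, PySem.List.slice_from _ (by norm_num : (0:Int) ≤ 2)]

-- ===== VERDICT (by name: the statement is the Claim_ definition above) =====
theorem base8_spec : Claim_equal_base8 := by
  intro num valido _ hpre
  unfold Spec_base8 base8 base8_alt pyOct
  by_cases hv : valido = true
  · have hnn : 0 ≤ num := hpre hv
    have hneg : ¬ num < 0 := by omega
    simp only [hv, if_true, hneg, if_false]
    by_cases h0 : num = 0
    · subst h0; decide
    · simp only [h0, if_false]
      have hd : ("0o" : String) ++ String.ofList (Nat.toDigits 8 num.toNat)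
          = String.ofList ('0' :: 'o' :: Nat.toDigits 8 num.toNat) := by
        rw [show ("0o" : String) = String.ofList ['0','o'] from rfl, ← String.ofList_append]
        rfl
      rw [hd, slice_two_cons, toDigits_eq_octStr num.toNat (by omega)]
      rw [join_loop_eq_octStr num.toNat num [] hnn (le_refl _)]
      simp [String.join]
  · simp [hv]
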